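-- pv_equiv track=rewrite | github.com/craiglow68/Vigenere-Cipher | tokenizer.py | tokenizeMult
-- ===== SOURCE A (Python) =====
-- def tokenizeMult(text, ngram):
--     textLength = len(text)
--     tempDict = {}
--     ngramFreq = {}
--
--     for index in range(textLength - (ngram - 1)):
--         textSnippet = text[index:index+ngram]
--
--         if textSnippet in ngramFreq:
--             ngramFreq[textSnippet] = ngramFreq[textSnippet] + 1
--         else:
--             if textSnippet in tempDict:
--                 ngramFreq[textSnippet] = 2
--             else:
--                 tempDict[textSnippet] = 1
--
--     return ngramFreq
-- ===== SOURCE B (Python) =====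
-- def tokenizeMult(text, ngram):
--     # Count-then-filter decomposition: first build a complete frequency table of
--     # every window, then a separate filtering pass emits (in order of second
--     # occurrence, i.e. the original's dict insertion order) each window
--     # occurring at least twice, valued by its total count.
--     span = range(len(text) - (ngram - 1))
--
--     counts = {}
--     for i in span:
--         w = text[i:i+ngram]
--         counts[w] = counts.get(w, 0) + 1
--
--     result = {}
--     seen = set()
--     for i in span:
--         w = text[i:i+ngram]
--         if w in seen:
--             result[w] = counts[w]
--         else:
--             seen.add(w)
--     return result
-- ===== Notes on version B (the rewrite author's own statement) =====
-- stated objective: alternative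
-- what changed: Replaces A's single pass over two deferred-maintenance dicts (tempDict for first sightings, ngramFreq promoted and incremented on later sightings) by a count-all-then-filter decomposition: one pass builds a complete frequency table of every window, then a separate filtering pass with a seen-set emits each repeated window (at its second occurrence, reproducing A's insertion order) valued by its total count.
import Mathlib
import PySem

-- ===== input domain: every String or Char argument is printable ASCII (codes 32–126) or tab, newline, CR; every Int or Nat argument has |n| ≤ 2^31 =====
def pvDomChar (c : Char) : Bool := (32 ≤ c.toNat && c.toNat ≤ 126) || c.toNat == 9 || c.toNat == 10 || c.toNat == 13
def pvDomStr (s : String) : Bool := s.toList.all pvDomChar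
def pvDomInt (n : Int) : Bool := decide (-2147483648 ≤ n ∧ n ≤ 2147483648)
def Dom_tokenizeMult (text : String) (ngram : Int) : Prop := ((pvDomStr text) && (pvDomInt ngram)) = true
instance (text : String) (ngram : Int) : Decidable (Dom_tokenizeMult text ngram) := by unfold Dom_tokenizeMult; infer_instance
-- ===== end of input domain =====

-- B replaces A's two-dict deferred-maintenance single pass by a count-all-then-filter
-- decomposition (full frequency table over the window list, then a filtering scan emitting
-- repeated windows); alternative algorithm, same asymptotic cost.


-- ===== PORT A =====
-- loop body of A: given (tempDict, ngramFreq) and the current snippet, A's three branches in order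
def pvStepA (s : PySem.Dict String Int × PySem.Dict String Int) (textSnippet : String) :
    PySem.Dict String Int × PySem.Dict String Int :=
  if s.2.contains textSnippet then
    (s.1, s.2.insert textSnippet (s.2.getD textSnippet 0 + 1))
  else if s.1.contains textSnippet then
    (s.1, s.2.insert textSnippet 2)
  else
    (s.1.insert textSnippet 1, s.2)

def tokenizeMult (text : String) (ngram : Int) : List (String × Int) :=
  let textLength := PySem.Str.len text
  let st := (PySem.List.pyRange 0 (textLength - (ngram - 1)) 1).foldl
    (fun s index => pvStepA s (PySem.Str.slice text (some index) (some (index + ngram))))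
    (PySem.Dict.empty, PySem.Dict.empty)
  st.2.items

-- ===== PORT B =====
-- loop body of B's filtering scan over (result, seen): on a re-sighting write the total count
def pvStepB (counts : PySem.Dict String Int) (s : PySem.Dict String Int × PySem.Set String)
    (w : String) : PySem.Dict String Int × PySem.Set String :=
  if PySem.Set.contains s.2 w then
    (s.1.insert w (counts.getD w 0), s.2)
  else
    (s.1, PySem.Set.add s.2 w)

def tokenizeMult_alt (text : String) (ngram : Int) : List (String × Int) :=
  let span := PySem.List.pyRange 0 (PySem.Str.len text - (ngram - 1)) 1
  let counts := span.foldl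
    (fun (d : PySem.Dict String Int) i =>
      let w := PySem.Str.slice text (some i) (some (i + ngram))
      d.insert w (d.getD w 0 + 1)) PySem.Dict.empty
  let st := span.foldl
    (fun s i => pvStepB counts s (PySem.Str.slice text (some i) (some (i + ngram))))
    (PySem.Dict.empty, PySem.Set.empty)
  st.1.items

-- ===== PRECONDITION & SPEC =====
def Spec_tokenizeMult (text : String) (ngram : Int) (out : List (String × Int)) : Prop := out = tokenizeMult_alt text ngram
instance (text : String) (ngram : Int) (out : List (String × Int)) : Decidable (Spec_tokenizeMult text ngram out) := by unfold Spec_tokenizeMult; infer_instance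

-- ===== CLAIM (what is proved, stated in full; the proofs are below) =====
def Claim_equal_tokenizeMult : Prop := ∀ (text : String) (ngram : Int), Dom_tokenizeMult text ngram → Spec_tokenizeMult text ngram (tokenizeMult text ngram)

-- ===== LEMMAS AND PROOFS =====

-- Main invariant: with a prefix p of the window list ws already processed, running A's loop
-- and B's filtering scan over the remaining windows r yields the same items, provided
-- ngramFreq/result hold the same key list L (the windows occurring ≥ 2 times in p, in order
-- of second occurrence) with running counts (A) vs. total counts (B) as values, and
-- tempDict/seen both hold exactly the windows of p.
theorem pv_main (ws : List String) (counts : PySem.Dict String Int)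
    (hc : ∀ w, counts.getD w 0 = (ws.count w : Int)) :
    ∀ (r p : List String), ws = p ++ r →
    ∀ (temp freq res : PySem.Dict String Int) (seen : PySem.Set String) (L : List String),
    freq.items = L.map (fun w => (w, (p.count w : Int))) →
    res.items = L.map (fun w => (w, (ws.count w : Int))) →
    (∀ w, temp.contains w = PySem.Set.contains seen w) →
    (∀ w, temp.contains w = true ↔ w ∈ p) →
    (∀ w, w ∈ L ↔ 2 ≤ p.count w) →
    L.Nodup →
    (r.foldl pvStepA (temp, freq)).2.items = (r.foldl (pvStepB counts) (res, seen)).1.items := by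
  intro r
  induction r with
  | nil =>
    intro p hp temp freq res seen L h1 h2 h3 h7 h8 h5
    simp only [List.append_nil] at hp
    subst hp
    simp only [List.foldl_nil]
    rw [h1, h2]
  | cons w r ih =>
    intro p hp temp freq res seen L h1 h2 h3 h7 h8 h5
    have hp' : ws = (p ++ [w]) ++ r := by simpa using hp
    have hk : freq.keys = L := by
      simp [PySem.Dict.keys, h1, List.map_map, Function.comp_def]
    have hrk : res.keys = L := by
      simp [PySem.Dict.keys, h2, List.map_map, Function.comp_def]
    have hfL : freq.contains w = true ↔ w ∈ L := by
      rw [PySem.Dict.contains_iff_mem_keys, hk]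
    have hrL : res.contains w = true ↔ w ∈ L := by
      rw [PySem.Dict.contains_iff_mem_keys, hrk]
    simp only [List.foldl_cons]
    by_cases hf : freq.contains w = true
    · -- w already counted ≥ 2 in p
      have hwL : w ∈ L := hfL.mp hf
      have hcnt : 2 ≤ p.count w := (h8 w).mp hwL
      have hwp : w ∈ p := List.count_pos_iff.mp (by omega)
      have hseen : w ∈ seen := (PySem.Set.contains_iff _ _).mp (by rw [← h3]; exact (h7 w).mpr hwp)
      have hgetD : freq.getD w 0 = (p.count w : Int) := by
        apply PySem.Dict.getD_of_mem_items (k := w) (v := ((p.count w : Int)))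
        · rw [h1]; exact List.mem_map.mpr ⟨w, hwL, rfl⟩
        · rw [hk]; exact h5
      have hA : pvStepA (temp, freq) w = (temp, freq.insert w ((p.count w : Int) + 1)) := by
        simp [pvStepA, hf, hgetD]
      have hB : pvStepB counts (res, seen) w = (res.insert w (counts.getD w 0), seen) := by
        simp [pvStepB, hseen]
      rw [hA, hB]
      apply ih (p ++ [w]) hp'
      · -- h1'
        rw [PySem.Dict.items_insert_of_contains _ _ hf, h1, List.map_map]
        apply List.map_congr_left
        intro x hx
        simp only [Function.comp]
        by_cases hxw : x = w
        · subst hxw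
          simp [List.count_append]
        · simp [List.count_append, List.count_nil, hxw, Ne.symm hxw]
      · -- h2'
        rw [PySem.Dict.items_insert_of_contains _ _ (hrL.mpr hwL), h2, List.map_map]
        apply List.map_congr_left
        intro x hx
        simp only [Function.comp]
        by_cases hxw : x = w
        · subst hxw; simp [hc]
        · simp [hxw, beq_iff_eq]
      · exact h3
      · -- h7'
        intro x
        rw [h7]
        simp only [List.mem_append, List.mem_singleton]
        constructor
        · exact Or.inl
        · rintro (h | rfl)
          · exact h
          · exact hwp
      · -- h8'
        intro x
        rw [h8]
        by_cases hxw : x = w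
        · subst hxw
          simp only [List.count_append, List.count_cons, List.count_nil, beq_self_eq_true,
            if_true]
          omega
        · simp [List.count_append, List.count_nil, Ne.symm hxw]
      · exact h5
    · by_cases ht : temp.contains w = true
      · -- second sighting: promote
        have hwL : w ∉ L := fun h => hf (hfL.mpr h)
        have hwp : w ∈ p := (h7 w).mp ht
        have hcnt1 : p.count w = 1 := by
          have h1' : 1 ≤ p.count w := List.count_pos_iff.mpr hwp
          have h2' : ¬ 2 ≤ p.count w := fun h => hwL ((h8 w).mpr h)
          omega
        have hseen : w ∈ seen := (PySem.Set.contains_iff _ _).mp (by rw [← h3]; exact ht)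
        have hA : pvStepA (temp, freq) w = (temp, freq.insert w 2) := by
          simp [pvStepA, hf, ht]
        have hB : pvStepB counts (res, seen) w = (res.insert w (counts.getD w 0), seen) := by
          simp [pvStepB, hseen]
        rw [hA, hB]
        apply ih (p ++ [w]) hp' _ _ _ _ (L ++ [w])
        · -- h1'
          rw [PySem.Dict.items_insert_of_not_contains _ _ (by simpa using hf), h1, List.map_append]
          congr 1
          · apply List.map_congr_left
            intro x hx
            have hxw : x ≠ w := fun h => hwL (h ▸ hx)
            simp [List.count_append, Ne.symm hxw]
          · simp [List.count_append, List.count_cons, List.count_nil, hcnt1]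
        · -- h2'
          rw [PySem.Dict.items_insert_of_not_contains _ _
                (by
                  cases hcc : res.contains w with
                  | false => rfl
                  | true => exact absurd (hrL.mp hcc) hwL), h2, List.map_append]
          simp [hc]
        · exact h3
        · -- h7'
          intro x
          rw [h7]
          simp only [List.mem_append, List.mem_singleton]
          constructor
          · exact Or.inl
          · rintro (h | rfl)
            · exact h
            · exact hwp
        · -- h8'
          intro x
          by_cases hxw : x = w
          · subst hxw
            simp [List.count_append, hcnt1]
          · simp only [List.mem_append, List.mem_singleton, List.count_append, List.count_cons,
              List.count_nil, beq_iff_eq, hxw, or_false, Nat.zero_add]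
            rw [h8]
            simp [Ne.symm hxw]
        · refine List.Nodup.append h5 (List.nodup_singleton w) ?_
          intro a ha hb
          simp only [List.mem_singleton] at hb
          subst hb
          exact hwL ha
      · -- first sighting
        have hwp : w ∉ p := fun h => ht ((h7 w).mpr h)
        have hwL : w ∉ L := fun h => hf (hfL.mpr h)
        have hcnt0 : p.count w = 0 := List.count_eq_zero.mpr hwp
        have hseen : w ∉ seen := fun h => ht (by rw [h3]; exact (PySem.Set.contains_iff _ _).mpr h)
        have hA : pvStepA (temp, freq) w = (temp.insert w 1, freq) := by
          simp [pvStepA, hf, ht]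
        have hB : pvStepB counts (res, seen) w = (res, PySem.Set.add seen w) := by
          simp [pvStepB, hseen]
        rw [hA, hB]
        apply ih (p ++ [w]) hp'
        · -- h1'
          rw [h1]
          apply List.map_congr_left
          intro x hx
          have hxp : x ∈ p := List.count_pos_iff.mp (by have := (h8 x).mp hx; omega)
          have hxw : x ≠ w := fun h => hwp (h ▸ hxp)
          simp [List.count_append, List.count_nil, Ne.symm hxw]
        · exact h2
        · -- h3'
          intro x
          apply Bool.eq_iff_iff.mpr
          simp only [PySem.Dict.contains_insert, PySem.Set.contains_iff, PySem.Set.mem_add,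
            Bool.or_eq_true, beq_iff_eq]
          rw [← PySem.Set.contains_iff, ← h3]
          tauto
        · -- h7'
          intro x
          simp only [PySem.Dict.contains_insert, Bool.or_eq_true, beq_iff_eq, List.mem_append,
            List.mem_singleton, h7]
          tauto
        · -- h8'
          intro x
          by_cases hxw : x = w
          · subst hxw
            simp [List.count_append, hcnt0, hwL]
          · simp only [List.count_append, List.count_cons, List.count_nil, beq_iff_eq,
              Ne.symm hxw, if_false, Nat.add_zero]
            exact h8 x
        · exact h5

theorem pv_equiv (text : String) (ngram : Int) :
    tokenizeMult text ngram = tokenizeMult_alt text ngram := by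
  simp only [tokenizeMult, tokenizeMult_alt]
  rw [← List.foldl_map (f := fun i => PySem.Str.slice text (some i) (some (i + ngram)))
       (g := pvStepA),
      ← List.foldl_map (f := fun i => PySem.Str.slice text (some i) (some (i + ngram)))
       (g := fun (d : PySem.Dict String Int) w => d.insert w (d.getD w 0 + 1)),
      ← List.foldl_map (f := fun i => PySem.Str.slice text (some i) (some (i + ngram)))
       (g := pvStepB _)]
  refine pv_main _ _ ?_ _ [] rfl _ _ _ _ [] ?_ ?_ ?_ ?_ ?_ List.nodup_nil
  · intro w
    rw [PySem.Dict.getD_foldl_insert_add_one]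
    simp
  · rfl
  · rfl
  · intro w; rfl
  · intro w; simp [PySem.Dict.contains_empty]
  · intro w; simp

-- ===== VERDICT (by name: the statement is the Claim_ definition above) =====
theorem tokenizeMult_spec : Claim_equal_tokenizeMult := by
  intro text ngram _
  exact pv_equiv text ngram
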